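-- pv_equiv track=rewrite | github.com/yibeichan/schist | cli/schist/acl.py | _scope_matches
-- ===== SOURCE A (Python) =====
-- def _scope_matches(allowed: list[str], target: str) -> bool:
--     """Check if target scope is covered by any scope in the allowed list.
--
--     Rules:
--     - "*" matches everything
--     - Exact match: "research" matches "research"
--     - Parent grants child: "research" matches "research/mario"
--     """
--     for scope in allowed:
--         if scope == "*":
--             return True
--         if target == scope:
--             return True
--         # Parent grants child: scope "research" covers "research/mario"
--         if target.startswith(scope + "/"):
--             return True
--     return False
-- ===== SOURCE B (Python) =====
-- def _scope_matches(allowed: list[str], target: str) -> bool: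
--     """Check if target scope is covered by any scope in the allowed list."""
--     # Index the granting scopes of `target` once: "*", target itself, and
--     # every ancestor prefix (target[:i] for each '/' at position i).
--     grants = {"*", target}
--     for i, ch in enumerate(target):
--         if ch == "/":
--             grants.add(target[:i])
--     return any(scope in grants for scope in allowed)
-- ===== Notes on version B (the rewrite author's own statement) =====
-- stated objective: alternative
-- what changed: Instead of testing three predicates (wildcard, equality, startswith) against each allowed scope, B builds the set of target's granting scopes once ("*", target, and each ancestor prefix before a '/') and answers with a uniform membership test over allowed.
import Mathlib
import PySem

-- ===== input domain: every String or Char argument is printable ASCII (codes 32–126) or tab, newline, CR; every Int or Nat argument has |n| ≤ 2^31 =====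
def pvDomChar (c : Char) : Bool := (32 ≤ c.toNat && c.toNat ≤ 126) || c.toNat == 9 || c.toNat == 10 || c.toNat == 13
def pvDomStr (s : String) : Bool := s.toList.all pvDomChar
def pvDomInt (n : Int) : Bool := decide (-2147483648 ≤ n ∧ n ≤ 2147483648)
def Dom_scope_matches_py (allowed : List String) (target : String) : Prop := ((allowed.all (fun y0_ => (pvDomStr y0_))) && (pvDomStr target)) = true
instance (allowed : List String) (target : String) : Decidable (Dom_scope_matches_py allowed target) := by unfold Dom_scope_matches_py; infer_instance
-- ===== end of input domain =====

-- B builds the target's set of granting scopes once and tests `allowed` by membership,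
-- instead of A's per-scope predicate chain (objective: alternative decomposition, same results).

-- ===== PORT A =====
def scope_matches_py (allowed : List String) (target : String) : Bool :=
  match allowed with
  | [] => false
  | scope :: rest =>
    if scope = "*" then true
    else if target = scope then true
    else if PySem.Str.startswith target (scope ++ "/") then true
    else scope_matches_py rest target

-- ===== PORT B =====
def scope_matches_py_alt (allowed : List String) (target : String) : Bool :=
  let grants0 : PySem.Set String := PySem.Set.add (PySem.Set.add PySem.Set.empty "*") target
  let grants : PySem.Set String :=
    (PySem.List.enumerate target.toList).foldl
      (fun g p => if p.2 = '/' then PySem.Set.add g (PySem.Str.slice target none (some p.1)) else g)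
      grants0
  allowed.any (fun scope => PySem.Set.contains grants scope)

-- ===== PRECONDITION & SPEC =====
def Spec_scope_matches_py (allowed : List String) (target : String) (out : Bool) : Prop := out = scope_matches_py_alt allowed target
instance (allowed : List String) (target : String) (out : Bool) : Decidable (Spec_scope_matches_py allowed target out) := by unfold Spec_scope_matches_py; infer_instance

-- ===== CLAIM (what is proved, stated in full; the proofs are below) =====
def Claim_equal_scope_matches_py : Prop := ∀ (allowed : List String) (target : String), Dom_scope_matches_py allowed target → Spec_scope_matches_py allowed target (scope_matches_py allowed target)

-- ===== LEMMAS AND PROOFS =====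

-- membership in the fold-built set
theorem mem_foldl_add_if {α β : Type} [DecidableEq α] (l : List β) (g0 : PySem.Set α)
    (P : β → Prop) [DecidablePred P] (f : β → α) (x : α) :
    x ∈ l.foldl (fun g p => if P p then PySem.Set.add g (f p) else g) g0 ↔
      x ∈ g0 ∨ ∃ p ∈ l, P p ∧ x = f p := by
  induction l generalizing g0 with
  | nil => simp
  | cons b l ih =>
    simp only [List.foldl_cons, ih, List.mem_cons]
    split_ifs with hb
    · simp only [PySem.Set.mem_add]
      constructor
      · rintro (⟨h | h⟩ | ⟨p, hp, hP, hx⟩)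
        · exact Or.inl h
        · exact Or.inr ⟨b, Or.inl rfl, hb, h⟩
        · exact Or.inr ⟨p, Or.inr hp, hP, hx⟩
      · rintro (h | ⟨p, hp | hp, hP, hx⟩)
        · exact Or.inl (Or.inl h)
        · exact Or.inl (Or.inr (hp ▸ hx))
        · exact Or.inr ⟨p, hp, hP, hx⟩
    · constructor
      · rintro (h | ⟨p, hp, hP, hx⟩)
        · exact Or.inl h
        · exact Or.inr ⟨p, Or.inr hp, hP, hx⟩
      · rintro (h | ⟨p, hp | hp, hP, hx⟩)
        · exact Or.inl h
        · exact absurd (hp ▸ hP) hb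
        · exact Or.inr ⟨p, hp, hP, hx⟩

-- (p ++ [c]) is a prefix of cs iff some position k holds c with cs.take k = p
theorem prefix_snoc_iff {α : Type} (p cs : List α) (c : α) :
    (p ++ [c]) <+: cs ↔ ∃ (k : Nat) (h : k < cs.length), cs[k] = c ∧ p = cs.take k := by
  constructor
  · rintro ⟨t, ht⟩
    refine ⟨p.length, ?_, ?_, ?_⟩
    · subst ht
      simp only [List.length_append, List.length_cons, List.length_nil]
      omega
    · subst ht
      rw [List.getElem_append_left (by simp)]
      simp
    · subst ht
      rw [List.append_assoc, List.take_left]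
  · rintro ⟨k, hk, hc, hp⟩
    have h1 : cs.take (k + 1) = p ++ [c] := by
      rw [List.take_add_one, hp]
      simp [List.getElem?_eq_getElem hk, hc]
    exact h1 ▸ List.take_prefix (k + 1) cs

-- PySem.Set.contains as membership
theorem set_contains_iff {α : Type} [DecidableEq α] (s : PySem.Set α) (x : α) :
    PySem.Set.contains s x = true ↔ x ∈ s := by
  simp [PySem.Set.contains]

-- A's startswith test characterised by B's slash positions
theorem startswith_slash_iff (target scope : String) :
    PySem.Str.startswith target (scope ++ "/") = true ↔
      ∃ (k : Nat) (h : k < target.toList.length),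
        target.toList[k] = '/' ∧ scope.toList = target.toList.take k := by
  have h : (scope ++ "/").toList = scope.toList ++ ['/'] := by simp
  rw [PySem.Str.startswith_eq, h, PySem.Chars.startswith_iff, prefix_snoc_iff]

-- membership in B's grants set
theorem mem_grants_iff (target scope : String) :
    PySem.Set.contains
      ((PySem.List.enumerate target.toList).foldl
        (fun g p => if p.2 = '/' then PySem.Set.add g (PySem.Str.slice target none (some p.1)) else g)
        (PySem.Set.add (PySem.Set.add PySem.Set.empty "*") target)) scope = true ↔
      scope = "*" ∨ scope = target ∨ PySem.Str.startswith target (scope ++ "/") = true := by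
  rw [set_contains_iff, mem_foldl_add_if, startswith_slash_iff]
  simp only [PySem.Set.mem_add]
  constructor
  · rintro (((h | h) | h) | ⟨p, hp, hP, hx⟩)
    · simp [PySem.Set.empty] at h
    · exact Or.inl h
    · exact Or.inr (Or.inl h)
    · refine Or.inr (Or.inr ?_)
      rw [PySem.List.mem_enumerate_iff] at hp
      obtain ⟨k, hk, hpk⟩ := hp
      refine ⟨k, hk, ?_, ?_⟩
      · have h2 : p.2 = target.toList[k] := by rw [hpk]
        rw [← h2]; exact hP
      · have h1 : p.1 = (k : Int) := by rw [hpk]; simp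
        have h3 : scope.toList = (PySem.Str.slice target none (some p.1)).toList :=
          congrArg String.toList hx
        rw [h1] at h3
        simpa [PySem.List.slice_to_natCast] using h3
  · rintro (h | h | ⟨k, hk, hc, htake⟩)
    · exact Or.inl (Or.inl (Or.inr h))
    · exact Or.inl (Or.inr h)
    · refine Or.inr ⟨((k : Int), target.toList[k]), ?_, by simpa using hc, ?_⟩
      · rw [PySem.List.mem_enumerate_iff]
        exact ⟨k, hk, by simp⟩
      · apply String.toList_injective
        simpa [PySem.List.slice_to_natCast] using htake

-- A = B unconditionally
theorem scope_matches_eq (allowed : List String) (target : String) :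
    scope_matches_py allowed target = scope_matches_py_alt allowed target := by
  induction allowed with
  | nil => rfl
  | cons scope rest ih =>
    have hstep : scope_matches_py_alt (scope :: rest) target =
        (PySem.Set.contains
          ((PySem.List.enumerate target.toList).foldl
            (fun g p => if p.2 = '/' then PySem.Set.add g (PySem.Str.slice target none (some p.1)) else g)
            (PySem.Set.add (PySem.Set.add PySem.Set.empty "*") target)) scope
          || scope_matches_py_alt rest target) := rfl
    rw [scope_matches_py, hstep]
    split_ifs with h1 h2 h3
    · rw [(mem_grants_iff target scope).mpr (Or.inl h1)]
      exact (Bool.true_or _).symm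
    · rw [(mem_grants_iff target scope).mpr (Or.inr (Or.inl h2.symm))]
      exact (Bool.true_or _).symm
    · rw [(mem_grants_iff target scope).mpr (Or.inr (Or.inr h3))]
      exact (Bool.true_or _).symm
    · have hf : PySem.Set.contains
          ((PySem.List.enumerate target.toList).foldl
            (fun g p => if p.2 = '/' then PySem.Set.add g (PySem.Str.slice target none (some p.1)) else g)
            (PySem.Set.add (PySem.Set.add PySem.Set.empty "*") target)) scope = false := by
        rw [Bool.eq_false_iff]
        intro hc
        rcases (mem_grants_iff target scope).mp hc with h | h | h
        · exact h1 h
        · exact h2 h.symm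
        · exact h3 h
      rw [hf, Bool.false_or]
      exact ih

-- ===== VERDICT (by name: the statement is the Claim_ definition above) =====
theorem scope_matches_py_spec : Claim_equal_scope_matches_py :=
  fun allowed target _ => scope_matches_eq allowed target
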